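-- pv_equiv track=rewrite | github.com/akkshay0107/vgc-rl | src/parse_showdown_logs.py | _strip_meta_header_lines
-- ===== SOURCE A (Python) =====
-- def _strip_meta_header_lines(lines: list[str]) -> tuple[list[str], str | None, str | None]:
--     expert_side: str | None = None
--     opponent_heuristic: str | None = None
--     rest = lines
--     while rest and rest[0].startswith("#"):
--         line = rest[0]
--         if line.startswith("# expert_side="):
--             v = line.split("=", 1)[1].strip().lower()
--             if v in ("p1", "p2"):
--                 expert_side = v
--         elif line.startswith("# opponent_heuristic="):
--             opponent_heuristic = line.split("=", 1)[1].strip().lower()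
--         rest = rest[1:]
--     return rest, expert_side, opponent_heuristic
-- ===== SOURCE B (Python) =====
-- def _strip_meta_header_lines(lines: list[str]) -> tuple[list[str], str | None, str | None]:
--     n = 0
--     while n < len(lines) and lines[n].startswith("#"):
--         n += 1
--     rest = lines[n:]
--     expert_side = None
--     opponent_heuristic = None
--     for line in reversed(lines[:n]):
--         if expert_side is None and line.startswith("# expert_side="):
--             v = line.split("=", 1)[1].strip().lower()
--             if v in ("p1", "p2"):
--                 expert_side = v
--         if opponent_heuristic is None and line.startswith("# opponent_heuristic="):
--             opponent_heuristic = line.split("=", 1)[1].strip().lower()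
--         if expert_side is not None and opponent_heuristic is not None:
--             break
--     return rest, expert_side, opponent_heuristic
-- ===== Notes on version B (the rewrite author's own statement) =====
-- stated objective: alternative
-- what changed: A interleaves header-stripping and metadata parsing in one forward while-loop with last-wins overwrites; B first computes the header length, then scans the header backwards taking the first match per key with an early break once both are found.
import Mathlib
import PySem

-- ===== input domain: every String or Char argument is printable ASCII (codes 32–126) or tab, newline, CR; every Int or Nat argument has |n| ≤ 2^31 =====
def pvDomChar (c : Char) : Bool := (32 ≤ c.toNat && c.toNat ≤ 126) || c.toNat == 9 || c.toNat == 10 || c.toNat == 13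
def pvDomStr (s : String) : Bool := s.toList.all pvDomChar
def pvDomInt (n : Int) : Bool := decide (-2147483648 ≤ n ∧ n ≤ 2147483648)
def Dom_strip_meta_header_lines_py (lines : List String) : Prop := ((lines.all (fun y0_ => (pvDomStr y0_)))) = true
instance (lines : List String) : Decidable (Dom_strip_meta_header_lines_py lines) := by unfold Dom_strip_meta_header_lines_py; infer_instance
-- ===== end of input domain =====

-- B replaces A's single forward while-loop (overwrite, last wins) by: compute the header
-- length first, then scan the header BACKWARDS taking the first match per key with an early
-- break once both are found; objective: alternative decomposition (same cost).

-- line.split("=", 1)[1].strip().lower()  (the "=" is guaranteed present under the callers' guards)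
def pvVal (line : String) : String :=
  PySem.Str.lower (PySem.Str.strip (((PySem.Str.splitMax? line "=" 1).getD []).getD 1 ""))

-- ===== PORT A =====
def stripA : List String → Option String → Option String → List String × Option String × Option String
  | [], es, oh => ([], es, oh)
  | line :: tl, es, oh =>
    if PySem.Str.startswith line "#" then
      if PySem.Str.startswith line "# expert_side=" then
        let v := pvVal line
        stripA tl (if v = "p1" ∨ v = "p2" then some v else es) oh
      else if PySem.Str.startswith line "# opponent_heuristic=" then
        stripA tl es (some (pvVal line))
      else stripA tl es oh
    else (line :: tl, es, oh)

def strip_meta_header_lines_py (lines : List String) : List String × Option String × Option String :=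
  stripA lines none none

-- ===== PORT B =====
-- while n < len(lines) and lines[n].startswith("#"): n += 1
def pvHdrLen : List String → Nat
  | [] => 0
  | l :: tl => if PySem.Str.startswith l "#" then pvHdrLen tl + 1 else 0

-- the reversed-header loop with early break
def stripB : List String → Option String → Option String → Option String × Option String
  | [], es, oh => (es, oh)
  | line :: tl, es, oh =>
      let es' := if es = none ∧ PySem.Str.startswith line "# expert_side=" then
                   (let v := pvVal line; if v = "p1" ∨ v = "p2" then some v else es)
                 else es
      let oh' := if oh = none ∧ PySem.Str.startswith line "# opponent_heuristic=" then
                   some (pvVal line)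
                 else oh
      if es' ≠ none ∧ oh' ≠ none then (es', oh') else stripB tl es' oh'

def strip_meta_header_lines_py_alt (lines : List String) : List String × Option String × Option String :=
  let n := pvHdrLen lines
  let r := stripB (lines.take n).reverse none none
  (lines.drop n, r.1, r.2)

-- ===== PRECONDITION & SPEC =====
def Spec_strip_meta_header_lines_py (lines : List String) (out : List String × Option String × Option String) : Prop := out = strip_meta_header_lines_py_alt lines
instance (lines : List String) (out : List String × Option String × Option String) : Decidable (Spec_strip_meta_header_lines_py lines out) := by unfold Spec_strip_meta_header_lines_py; infer_instance

-- ===== CLAIM (what is proved, stated in full; the proofs are below) =====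
def Claim_equal_strip_meta_header_lines_py : Prop := ∀ (lines : List String), Dom_strip_meta_header_lines_py lines → Spec_strip_meta_header_lines_py lines (strip_meta_header_lines_py lines)

-- ===== LEMMAS AND PROOFS =====

def pvHdrP (l : String) : Bool := PySem.Str.startswith l "#"

def fES (l : String) : Option String :=
  if PySem.Str.startswith l "# expert_side=" then
    (let v := pvVal l; if v = "p1" ∨ v = "p2" then some v else none)
  else none

def fOH (l : String) : Option String :=
  if PySem.Str.startswith l "# opponent_heuristic=" then some (pvVal l) else none

def updES (es : Option String) (l : String) : Option String :=
  if PySem.Str.startswith l "# expert_side=" then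
    (let v := pvVal l; if v = "p1" ∨ v = "p2" then some v else es)
  else es

def updOH (oh : Option String) (l : String) : Option String :=
  if ¬ PySem.Str.startswith l "# expert_side=" ∧ PySem.Str.startswith l "# opponent_heuristic=" then
    some (pvVal l)
  else oh

-- the two metadata prefixes are mutually exclusive
theorem excl (l : String) (h : PySem.Str.startswith l "# expert_side=" = true) :
    PySem.Str.startswith l "# opponent_heuristic=" = false := by
  by_contra hc
  simp only [Bool.not_eq_false] at hc
  rw [PySem.Str.startswith_eq, PySem.Chars.startswith_iff] at h hc
  have h3 : "# e".toList <+: l.toList := List.IsPrefix.trans (by decide) h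
  have h3' : "# o".toList <+: l.toList := List.IsPrefix.trans (by decide) hc
  rw [List.prefix_iff_eq_take] at h3 h3'
  have hl : ("# e".toList.length : Nat) = "# o".toList.length := by decide
  rw [hl] at h3
  exact absurd (h3.trans h3'.symm) (by decide)

theorem updES_eq (es : Option String) (l : String) : updES es l = (fES l).or es := by
  unfold updES fES
  by_cases h1 : PySem.Str.startswith l "# expert_side=" = true
  · simp at h1
    by_cases hv : (pvVal l = "p1" ∨ pvVal l = "p2") <;> cases es <;> simp [h1, hv, Option.or]
  · simp at h1
    cases es <;> simp [h1, Option.or]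

theorem updOH_eq (oh : Option String) (l : String) : updOH oh l = (fOH l).or oh := by
  unfold updOH fOH
  by_cases he : PySem.Str.startswith l "# expert_side=" = true
  · have hno := excl l he
    simp at he hno
    cases oh <;> simp [he, hno, Option.or]
  · by_cases ho : PySem.Str.startswith l "# opponent_heuristic=" = true
    · simp at he ho
      cases oh <;> simp [he, ho, Option.or]
    · simp at he ho
      cases oh <;> simp [he, ho, Option.or]

-- A's loop = (dropWhile, forward folds over takeWhile)
theorem stripA_char (lines : List String) : ∀ es oh,
    stripA lines es oh =
      (lines.dropWhile pvHdrP,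
       (lines.takeWhile pvHdrP).foldl updES es,
       (lines.takeWhile pvHdrP).foldl updOH oh) := by
  induction lines with
  | nil => intro es oh; simp [stripA]
  | cons l tl ih =>
    intro es oh
    by_cases h : PySem.Str.startswith l "#" = true
    · simp at h
      by_cases he : PySem.Str.startswith l "# expert_side=" = true
      · have hno := excl l he
        simp at he hno
        simp [stripA, h, he, hno, List.dropWhile, List.takeWhile, pvHdrP, ih, updES, updOH]
      · simp at he
        by_cases ho : PySem.Str.startswith l "# opponent_heuristic=" = true
        · simp at ho
          simp [stripA, h, he, ho, List.dropWhile, List.takeWhile, pvHdrP, ih, updES, updOH]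
        · simp at ho
          simp [stripA, h, he, ho, List.dropWhile, List.takeWhile, pvHdrP, ih, updES, updOH]
    · simp at h
      simp [stripA, h, List.dropWhile, List.takeWhile, pvHdrP]

-- B's reverse loop with break = first match per key (unset keys fall through)
theorem stripB_char (rl : List String) : ∀ es oh,
    stripB rl es oh = (es.or (rl.findSome? fES), oh.or (rl.findSome? fOH)) := by
  induction rl with
  | nil => intro es oh; cases es <;> cases oh <;> simp [stripB, Option.or]
  | cons l tl ih =>
    intro es oh
    have hes : (if es = none ∧ PySem.Str.startswith l "# expert_side=" then
                 (let v := pvVal l; if v = "p1" ∨ v = "p2" then some v else es)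
               else es) = (if es = none then (fES l).or es else es) := by
      unfold fES
      cases es <;> by_cases h1 : PySem.Str.startswith l "# expert_side=" = true <;>
        by_cases hv : (pvVal l = "p1" ∨ pvVal l = "p2") <;> simp_all [Option.or]
    have hoh : (if oh = none ∧ PySem.Str.startswith l "# opponent_heuristic=" then
                 some (pvVal l) else oh) = (if oh = none then (fOH l).or oh else oh) := by
      unfold fOH
      cases oh <;> by_cases h1 : PySem.Str.startswith l "# opponent_heuristic=" = true <;>
        simp_all [Option.or]
    show (let es' := _; let oh' := _; if es' ≠ none ∧ oh' ≠ none then (es', oh') else stripB tl es' oh') = _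
    simp only [hes, hoh]
    have key : ∀ (a b : Option String),
        (if (if a = none then (fES l).or a else a) ≠ none ∧
            (if b = none then (fOH l).or b else b) ≠ none then
           ((if a = none then (fES l).or a else a), (if b = none then (fOH l).or b else b))
         else stripB tl (if a = none then (fES l).or a else a) (if b = none then (fOH l).or b else b)) =
        (a.or ((l :: tl).findSome? fES), b.or ((l :: tl).findSome? fOH)) := by
      intro a b
      have hfind : ∀ (f : String → Option String), (l :: tl).findSome? f = (f l).or (tl.findSome? f) := by
        intro f; cases hf : f l <;> simp [List.findSome?, hf, Option.or]
      rw [hfind, hfind]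
      cases a <;> cases b <;>
        cases hES : fES l <;> cases hOH : fOH l <;>
          simp [ih, Option.or]
    exact key es oh

-- forward last-wins fold = reversed first-match
theorem foldES (h : List String) : ∀ es,
    h.foldl updES es = (h.reverse.findSome? fES).or es := by
  induction h with
  | nil => intro es; cases es <;> simp [Option.or]
  | cons l tl ih =>
    intro es
    simp only [List.foldl, List.reverse_cons, List.findSome?_append, ih, updES_eq]
    cases htl : tl.reverse.findSome? fES <;> cases hl : fES l <;> cases es <;>
      simp [Option.or, List.findSome?, hl]

theorem foldOH (h : List String) : ∀ oh,
    h.foldl updOH oh = (h.reverse.findSome? fOH).or oh := by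
  induction h with
  | nil => intro oh; cases oh <;> simp [Option.or]
  | cons l tl ih =>
    intro oh
    simp only [List.foldl, List.reverse_cons, List.findSome?_append, ih, updOH_eq]
    cases htl : tl.reverse.findSome? fOH <;> cases hl : fOH l <;> cases oh <;>
      simp [Option.or, List.findSome?, hl]

theorem tw_take (p : String → Bool) (l : List String) :
    l.take (l.takeWhile p).length = l.takeWhile p := by
  induction l with
  | nil => rfl
  | cons a t ih => by_cases h : p a = true <;> simp [List.takeWhile, h, ih]

theorem tw_drop (p : String → Bool) (l : List String) :
    l.drop (l.takeWhile p).length = l.dropWhile p := by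
  induction l with
  | nil => rfl
  | cons a t ih => by_cases h : p a = true <;> simp [List.takeWhile, List.dropWhile, h, ih]

theorem pvHdrLen_eq (lines : List String) : pvHdrLen lines = (lines.takeWhile pvHdrP).length := by
  induction lines with
  | nil => rfl
  | cons l tl ih =>
    by_cases h : PySem.Str.startswith l "#" = true <;> simp at h <;>
      simp [pvHdrLen, List.takeWhile, pvHdrP, h, ih]

-- ===== VERDICT (by name: the statement is the Claim_ definition above) =====
theorem strip_meta_header_lines_py_spec : Claim_equal_strip_meta_header_lines_py := by
  intro lines _
  unfold Spec_strip_meta_header_lines_py strip_meta_header_lines_py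
  simp only [strip_meta_header_lines_py_alt]
  rw [stripA_char, stripB_char, pvHdrLen_eq, tw_take, tw_drop]
  rw [foldES, foldOH]
  cases hES : (List.takeWhile pvHdrP lines).reverse.findSome? fES <;>
    cases hOH : (List.takeWhile pvHdrP lines).reverse.findSome? fOH <;>
      simp [Option.or]
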